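-- pv_equiv track=rewrite | github.com/piotrhelm/NESTFUL | data_v2/executable_functions/py_code_file_757.py | format_with_type
-- ===== SOURCE A (Python) =====
-- from typing import List
--
-- def format_with_type(input_list: List[str], type: str) -> List[str]:
--
--     """Formats a list of strings according to different types.
--
--
--
--     Args:
--
--         input_list: The list of strings to format.
--
--         type: The type of format to apply.
--
--
--
--     Returns:
--
--         A new list with the formatted strings.
--
--
--
--     Raises:
--
--         ValueError: If the type is not supported.
--
--     """
--
--     if type == "uppercase":
--
--         return [word.upper() for word in input_list]
--
--
--
--     if type == "lowercase":
--
--         return [word.lower() for word in input_list]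
--
--
--
--     if type == "sentence":
--
--         return [word.capitalize() for word in input_list]
--
--
--
--     if type == "title":
--
--         return [word.title() for word in input_list]
--
--
--
--     raise ValueError("Invalid type: ", type)
-- ===== SOURCE B (Python) =====
-- def _to_upper(ch):
--     return chr(ord(ch) - 32) if 'a' <= ch <= 'z' else ch
--
-- def _to_lower(ch):
--     return chr(ord(ch) + 32) if 'A' <= ch <= 'Z' else ch
--
-- def _is_alpha(ch):
--     return 'a' <= ch <= 'z' or 'A' <= ch <= 'Z'
--
-- def format_with_type(input_list, type):
--     if type not in ("uppercase", "lowercase", "sentence", "title"):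
--         raise ValueError("Invalid type: ", type)
--     result = []
--     for word in input_list:
--         chars = []
--         prev_alpha = False
--         for i, ch in enumerate(word):
--             if type == "uppercase":
--                 chars.append(_to_upper(ch))
--             elif type == "lowercase":
--                 chars.append(_to_lower(ch))
--             elif type == "sentence":
--                 chars.append(_to_upper(ch) if i == 0 else _to_lower(ch))
--             else:  # title: uppercase after a non-letter, lowercase after a letter
--                 chars.append(_to_lower(ch) if prev_alpha else _to_upper(ch))
--             prev_alpha = _is_alpha(ch)
--         result.append("".join(chars))
--     return result
-- ===== Notes on version B (the rewrite author's own statement) =====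
-- stated objective: alternative
-- what changed: Instead of selecting among four library string methods, B validates the type once and runs a single character-level state machine per word (tracking position and whether the previous character was a letter) that implements all four casings itself via ASCII arithmetic.
import Mathlib
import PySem

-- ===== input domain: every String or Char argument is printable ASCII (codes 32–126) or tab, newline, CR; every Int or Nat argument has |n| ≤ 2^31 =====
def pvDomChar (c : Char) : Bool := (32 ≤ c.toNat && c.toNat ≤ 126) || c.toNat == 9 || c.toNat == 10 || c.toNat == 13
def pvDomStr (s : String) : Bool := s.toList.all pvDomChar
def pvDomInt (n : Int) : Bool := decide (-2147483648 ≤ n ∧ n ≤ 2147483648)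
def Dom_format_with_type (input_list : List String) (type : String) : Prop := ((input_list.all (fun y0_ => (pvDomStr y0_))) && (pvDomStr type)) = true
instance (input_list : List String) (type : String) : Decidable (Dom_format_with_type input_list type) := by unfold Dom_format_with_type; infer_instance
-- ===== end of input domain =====

-- B replaces A's four library-method branches by one per-word character-level state machine
-- doing the ASCII case arithmetic itself (alternative); on unsupported types both raise ValueError (excluded by Pre_).
-- A-side helpers: str.capitalize / str.title ported by hand over List Char (exact on the ASCII domain: ASCII titlecase = uppercase, 'cased' = isalpha).
def pyCapChars : List Char → List Char
  | [] => []
  | c :: rest => PySem.Chars.upperChar c :: rest.map PySem.Chars.lowerChar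

def pyCapitalize (s : String) : String := String.ofList (pyCapChars s.toList)

def pyTitleChars : Bool → List Char → List Char
  | _, [] => []
  | prevAlpha, c :: rest =>
      (if prevAlpha then PySem.Chars.lowerChar c else PySem.Chars.upperChar c)
        :: pyTitleChars (PySem.Chars.isalpha c) rest

def pyTitle (s : String) : String := String.ofList (pyTitleChars false s.toList)

-- ===== PORT A =====
def format_with_type (input_list : List String) (type : String) : List String :=
  if type = "uppercase" then input_list.map PySem.Str.upper
  else if type = "lowercase" then input_list.map PySem.Str.lower
  else if type = "sentence" then input_list.map pyCapitalize
  else if type = "title" then input_list.map pyTitle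
  else []  -- Python raises ValueError here; excluded by Pre_

-- ===== PORT B =====
-- B's ASCII case helpers (Source B: _to_upper, _to_lower, _is_alpha)
def bUp (c : Char) : Char := if 'a' ≤ c ∧ c ≤ 'z' then Char.ofNat (c.toNat - 32) else c
def bDown (c : Char) : Char := if 'A' ≤ c ∧ c ≤ 'Z' then Char.ofNat (c.toNat + 32) else c
def bAlpha (c : Char) : Bool := ('a' ≤ c && c ≤ 'z') || ('A' ≤ c && c ≤ 'Z')

-- Source B's inner loop: one pass over the word's characters with index i and prev_alpha state
def bWord (type : String) : Nat → Bool → List Char → List Char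
  | _, _, [] => []
  | i, prev, c :: rest =>
      (if type = "uppercase" then bUp c
       else if type = "lowercase" then bDown c
       else if type = "sentence" then (if i = 0 then bUp c else bDown c)
       else (if prev then bDown c else bUp c))
        :: bWord type (i + 1) (bAlpha c) rest

def format_with_type_alt (input_list : List String) (type : String) : List String :=
  if ¬ (type = "uppercase" ∨ type = "lowercase" ∨ type = "sentence" ∨ type = "title") then
    []  -- Python raises ValueError here; excluded by Pre_
  else
    input_list.map (fun word => String.ofList (bWord type 0 false word.toList))

-- ===== PRECONDITION & SPEC =====
-- Pre_ excludes exactly the type strings on which Python A raises ValueError (B raises there too).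
def Pre_format_with_type (_input_list : List String) (type : String) : Prop :=
  type = "uppercase" ∨ type = "lowercase" ∨ type = "sentence" ∨ type = "title"
instance (input_list : List String) (type : String) : Decidable (Pre_format_with_type input_list type) := by unfold Pre_format_with_type; infer_instance

def pvWitness_format_with_type : List String × String := (["Hello", "woRLD"], "title")

def Spec_format_with_type (input_list : List String) (type : String) (out : List String) : Prop := out = format_with_type_alt input_list type
instance (input_list : List String) (type : String) (out : List String) : Decidable (Spec_format_with_type input_list type out) := by unfold Spec_format_with_type; infer_instance

-- ===== CLAIM =====
def Claim_equal_format_with_type : Prop := ∀ (input_list : List String) (type : String), Dom_format_with_type input_list type → Pre_format_with_type input_list type → Spec_format_with_type input_list type (format_with_type input_list type)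

-- ===== LEMMAS AND PROOFS =====
theorem bUp_eq (c : Char) : bUp c = PySem.Chars.upperChar c := by
  simp [bUp, PySem.Chars.upperChar, PySem.Chars.islower]

theorem bDown_eq (c : Char) : bDown c = PySem.Chars.lowerChar c := by
  simp [bDown, PySem.Chars.lowerChar, PySem.Chars.isupper]

theorem bAlpha_eq (c : Char) : bAlpha c = PySem.Chars.isalpha c := by
  simp [bAlpha, PySem.Chars.isalpha, PySem.Chars.islower, PySem.Chars.isupper, Bool.or_comm]

theorem bWord_upper (i : Nat) (p : Bool) (l : List Char) :
    bWord "uppercase" i p l = l.map PySem.Chars.upperChar := by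
  induction l generalizing i p with
  | nil => simp [bWord]
  | cons c rest ih => simp [bWord, ih, bUp_eq]

theorem bWord_lower (i : Nat) (p : Bool) (l : List Char) :
    bWord "lowercase" i p l = l.map PySem.Chars.lowerChar := by
  induction l generalizing i p with
  | nil => simp [bWord]
  | cons c rest ih => simp [bWord, ih, bDown_eq]

theorem bWord_sentence_tail (i : Nat) (p : Bool) (l : List Char) :
    bWord "sentence" (i + 1) p l = l.map PySem.Chars.lowerChar := by
  induction l generalizing i p with
  | nil => simp [bWord]
  | cons c rest ih => simp [bWord, ih, bDown_eq]

theorem bWord_sentence (p : Bool) (l : List Char) :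
    bWord "sentence" 0 p l = pyCapChars l := by
  cases l with
  | nil => simp [bWord, pyCapChars]
  | cons c rest => simp [bWord, pyCapChars, bUp_eq, bWord_sentence_tail]

theorem bWord_title (i : Nat) (p : Bool) (l : List Char) :
    bWord "title" i p l = pyTitleChars p l := by
  induction l generalizing i p with
  | nil => simp [bWord, pyTitleChars]
  | cons c rest ih => simp [bWord, pyTitleChars, ih, bUp_eq, bDown_eq, bAlpha_eq]

-- ===== VERDICT =====
theorem format_with_type_spec : Claim_equal_format_with_type := by
  intro input_list type _ hpre
  unfold Spec_format_with_type format_with_type format_with_type_alt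
  rcases hpre with h | h | h | h <;> subst h <;> simp <;>
    intro w _ <;>
    simp [PySem.Str.upper, PySem.Str.lower, pyCapitalize, pyTitle,
          bWord_upper, bWord_lower, bWord_sentence, bWord_title,
          PySem.Chars.upper, PySem.Chars.lower]
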